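-- pv_equiv track=rewrite | github.com/jano31415/codejam | codeforces/edu7/probb.py | solve
-- ===== SOURCE A (Python) =====
-- def solve(n,s):
--     one_players = s.count("1")
--     two_players = s.count("2")
--     if two_players in [1,2]:
--         return "NO", []
--     player2=[]
--     for i,p in enumerate(s):
--         if p == "2":
--             player2.append(i)
--     grid = [["=" for _ in range(len(s))] for _2 in range(len(s))]
--     for i in range(n):
--         grid[i][i] = "X"
--
--     for i,p in enumerate(player2):
--         j = i+1
--         if j == len(player2):
--             j = 0
--         grid[p][player2[j]] = "+"
--         grid[player2[j]][p] = "-"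
--
--     return "YES",grid
-- ===== SOURCE B (Python) =====
-- def solve(n, s):
--     L = len(s)
--     twos = [i for i, c in enumerate(s) if c == "2"]
--     m = len(twos)
--     if m in (1, 2):
--         return "NO", []
--     succ = {}
--     pred = {}
--     for k, p in enumerate(twos):
--         q = twos[(k + 1) % m]
--         succ[p] = q
--         pred[q] = p
--     grid = []
--     for i in range(L):
--         marks = []
--         if i < n:
--             marks.append((i, "X"))
--         if i in succ:
--             marks.append((succ[i], "+"))
--         if i in pred:
--             marks.append((pred[i], "-"))
--         marks.sort(key=lambda t: t[0])
--         row = []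
--         prev = 0
--         for col, sym in marks:
--             row += ["="] * (col - prev)
--             row.append(sym)
--             prev = col + 1
--         row += ["="] * (L - prev)
--         grid.append(row)
--     return "YES", grid
-- ===== Notes on version B (the rewrite author's own statement) =====
-- stated objective: alternative
-- what changed: A pre-fills an L-by-L grid with '=' and mutates it (diagonal pass, then cyclic +/- overwrites); B never materializes a default grid: it builds successor/predecessor dicts over the '2'-positions once and assembles each row independently by gap-filling concatenation of '='-runs between its at most three marked columns.
import Mathlib
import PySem

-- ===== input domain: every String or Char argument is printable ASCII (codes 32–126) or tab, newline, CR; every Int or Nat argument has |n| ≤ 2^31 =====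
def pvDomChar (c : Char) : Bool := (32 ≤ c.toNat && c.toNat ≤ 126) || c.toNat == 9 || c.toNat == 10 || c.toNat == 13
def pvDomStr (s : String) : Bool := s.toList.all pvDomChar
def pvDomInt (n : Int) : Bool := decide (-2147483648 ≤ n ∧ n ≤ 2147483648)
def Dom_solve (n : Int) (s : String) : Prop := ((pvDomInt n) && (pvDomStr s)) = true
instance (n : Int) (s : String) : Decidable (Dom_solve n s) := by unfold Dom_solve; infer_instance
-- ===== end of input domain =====

-- B replaces A's pre-filled grid and cell overwrites by successor/predecessor dicts over the
-- '2'-positions and gap-filling row assembly (objective: alternative decomposition, same cost).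

-- ===== PORT A =====
-- Python 'grid[i][j] = v' (indices here are always ≥ 0; out-of-range writes are excluded by Pre_solve)
def setCell (g : List (List String)) (i j : Int) (v : String) : List (List String) :=
  g.set i.toNat ((g.getD i.toNat []).set j.toNat v)

def solve (n : Int) (s : String) : String × List (List String) :=
  let cs := s.toList
  let _one_players := PySem.Str.count s "1"
  let two_players := PySem.Str.count s "2"
  if two_players = 1 ∨ two_players = 2 then ("NO", [])
  else
    let player2 : List Int :=
      (PySem.List.enumerate cs).foldl
        (fun acc ip => if ip.2 = '2' then acc ++ [ip.1] else acc) []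
    let L := cs.length
    let grid0 := List.replicate L (List.replicate L "=")
    let grid1 := (PySem.List.pyRange 0 n).foldl (fun g i => setCell g i i "X") grid0
    let m := player2.length
    let grid2 := (PySem.List.enumerate player2).foldl
      (fun g kp =>
        let j : Int := if kp.1 + 1 = (m : Int) then 0 else kp.1 + 1
        let q := PySem.List.pyGetD player2 j 0
        setCell (setCell g kp.2 q "+") q kp.2 "-") grid1
    ("YES", grid2)

-- ===== PORT B =====
-- per-row gap-filling assembly (the body of Source B's "for i in range(L)" loop)
def rowB (n : Int) (L : Int) (sd pd : PySem.Dict Int Int) (i : Int) : List String :=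
  let marks0 : List (Int × String) := []
  let marks1 := if i < n then marks0 ++ [(i, "X")] else marks0
  let marks2 := if sd.contains i then marks1 ++ [(sd.getD i 0, "+")] else marks1
  let marks3 := if pd.contains i then marks2 ++ [(pd.getD i 0, "-")] else marks2
  let marks := PySem.List.sorted marks3 (fun t => t.1) false
  let rp := marks.foldl
    (fun (st : List String × Int) c =>
      (st.1 ++ List.replicate (c.1 - st.2).toNat "=" ++ [c.2], c.1 + 1)) ([], 0)
  rp.1 ++ List.replicate (L - rp.2).toNat "="

def solve_alt (n : Int) (s : String) : String × List (List String) :=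
  let cs := s.toList
  let L := cs.length
  let twos : List Int :=
    (PySem.List.enumerate cs).filterMap (fun ip => if ip.2 = '2' then some ip.1 else none)
  let m := twos.length
  if m = 1 ∨ m = 2 then ("NO", [])
  else
    let sp := (PySem.List.enumerate twos).foldl
      (fun (d : PySem.Dict Int Int × PySem.Dict Int Int) kp =>
        let q := PySem.List.pyGetD twos (PySem.Int.mod (kp.1 + 1) (m : Int)) 0
        (d.1.insert kp.2 q, d.2.insert q kp.2))
      (PySem.Dict.empty, PySem.Dict.empty)
    let grid := (PySem.List.pyRange 0 (L : Int)).foldl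
      (fun g i => g ++ [rowB n (L : Int) sp.1 sp.2 i]) []
    ("YES", grid)

-- ===== PRECONDITION & SPEC =====
-- Pre_ excludes exactly the inputs where A raises IndexError: n > len(s) while the
-- count of '2's is not 1 or 2 (then the diagonal loop indexes past the grid).
def Pre_solve (n : Int) (s : String) : Prop :=
  n ≤ (s.toList.length : Int) ∨ s.toList.count '2' = 1 ∨ s.toList.count '2' = 2
instance (n : Int) (s : String) : Decidable (Pre_solve n s) := by unfold Pre_solve; infer_instance

def pvWitness_solve : Int × String := (2, "2A22")

def Spec_solve (n : Int) (s : String) (out : String × List (List String)) : Prop := out = solve_alt n s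
instance (n : Int) (s : String) (out : String × List (List String)) : Decidable (Spec_solve n s out) := by unfold Spec_solve; infer_instance

-- ===== CLAIM (what is proved, stated in full; the proofs are below) =====
def Claim_equal_solve : Prop := ∀ (n : Int) (s : String), Dom_solve n s → Pre_solve n s → Spec_solve n s (solve n s)

-- ===== LEMMAS AND PROOFS =====

-- Python str.count of the single character "2" is the character count.
lemma count_go_singleton (c : Char) : ∀ (l : List Char) (fuel acc : Nat), l.length ≤ fuel →
    PySem.Chars.count.go [c] fuel l acc = acc + l.count c := by
  intro l
  induction l with
  | nil => intro fuel acc _; cases fuel <;> simp [PySem.Chars.count.go]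
  | cons h t ih =>
    intro fuel acc hf
    cases fuel with
    | zero => simp at hf
    | succ f =>
      rw [PySem.Chars.count.go]
      simp only [List.length_cons] at hf
      by_cases hc : c = h
      · subst hc
        simp only [List.isPrefixOf, BEq.rfl, Bool.true_and]
        simp [ih f (acc + 1) (by omega)]
        omega
      · have : ([c].isPrefixOf (h :: t)) = false := by
          simp [List.isPrefixOf, hc]
        simp [this, ih f acc (by omega), List.count_cons, Ne.symm hc]

lemma str_count_two (s : String) : PySem.Str.count s "2" = s.toList.count '2' := by
  rw [PySem.Str.count_eq]
  show PySem.Chars.count s.toList ['2'] = _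
  rw [PySem.Chars.count]
  have := count_go_singleton '2' s.toList s.toList.length 0 le_rfl
  simpa using this

def getCell (g : List (List String)) (i j : Nat) : String := (g.getD i []).getD j "="

def applyWrites (ws : List ((Int × Int) × String)) (g : List (List String)) : List (List String) :=
  ws.foldl (fun g w => setCell g w.1.1 w.1.2 w.2) g

def UniformGrid (L : Nat) (g : List (List String)) : Prop :=
  g.length = L ∧ ∀ r ∈ g, r.length = L

lemma uniform_setCell {L : Nat} {g : List (List String)} (h : UniformGrid L g) (i j : Int) (v : String) :
    UniformGrid L (setCell g i j v) := by
  obtain ⟨h1, h2⟩ := h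
  by_cases hi : i.toNat < g.length
  · refine ⟨by simp [setCell, h1], ?_⟩
    intro r hr
    rcases List.mem_or_eq_of_mem_set hr with hm | hm
    · exact h2 r hm
    · subst hm
      rw [List.length_set, List.getD_eq_getElem _ _ hi]
      exact h2 _ (List.getElem_mem hi)
  · unfold setCell
    rw [List.set_eq_of_length_le (by omega)]
    exact ⟨h1, h2⟩

lemma uniform_applyWrites {L : Nat} (ws : List ((Int × Int) × String)) {g : List (List String)}
    (h : UniformGrid L g) : UniformGrid L (applyWrites ws g) := by
  induction ws generalizing g with
  | nil => exact h
  | cons w t ih => exact ih (uniform_setCell h _ _ _)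

lemma getCell_setCell {L : Nat} {g : List (List String)} (hg : UniformGrid L g)
    {a b : Int} (ha : 0 ≤ a) (haL : a < (L : Int)) (hb : 0 ≤ b) (hbL : b < (L : Int))
    {i j : Nat} (hi : i < L) (hj : j < L) (v : String) :
    getCell (setCell g a b v) i j = if a = (i : Int) ∧ b = (j : Int) then v else getCell g i j := by
  obtain ⟨h1, h2⟩ := hg
  have hiL : i < g.length := by omega
  have haG : a.toNat < g.length := by omega
  have hrow : (g.getD a.toNat []).length = L := by
    rw [List.getD_eq_getElem _ _ haG]; exact h2 _ (List.getElem_mem haG)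
  have hlen : (g.set a.toNat ((g.getD a.toNat []).set b.toNat v)).length = g.length :=
    List.length_set ..
  unfold getCell setCell
  by_cases hai : a.toNat = i
  · have houter : (g.set a.toNat ((g.getD a.toNat []).set b.toNat v)).getD i []
        = (g.getD a.toNat []).set b.toNat v := by
      subst hai
      rw [List.getD_eq_getElem _ _ (by omega), List.getElem_set_self]
    rw [houter]
    by_cases hbj : b.toNat = j
    · subst hbj
      rw [List.getD_eq_getElem _ _ (by rw [List.length_set]; omega), List.getElem_set_self,
        if_pos ⟨by omega, by omega⟩]
    · rw [if_neg (by intro ⟨x, y⟩; omega)]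
      rw [List.getD_eq_getElem?_getD, List.getElem?_set_ne (by omega), ← List.getD_eq_getElem?_getD,
        hai]
  · have houter : (g.set a.toNat ((g.getD a.toNat []).set b.toNat v)).getD i []
        = g.getD i [] := by
      rw [List.getD_eq_getElem?_getD, List.getElem?_set_ne (by omega), ← List.getD_eq_getElem?_getD]
    rw [houter, if_neg (by intro ⟨x, y⟩; omega)]

lemma lookupP_eq_none_iff {β : Type} {c : Int × Int} {ws : List ((Int × Int) × β)} :
    List.lookup c ws = none ↔ c ∉ ws.map Prod.fst := by
  induction ws with
  | nil => simp
  | cons w t ih =>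
    by_cases h : c = w.1
    · simp [List.lookup, h]
    · simp [List.lookup, h, Ne.symm h, ih, beq_false_of_ne h]

lemma getCell_applyWrites {L : Nat} (ws : List ((Int × Int) × String))
    {g : List (List String)} (hg : UniformGrid L g)
    (hw : ∀ w ∈ ws, 0 ≤ w.1.1 ∧ w.1.1 < (L : Int) ∧ 0 ≤ w.1.2 ∧ w.1.2 < (L : Int))
    (hn : (ws.map Prod.fst).Nodup)
    {i j : Nat} (hi : i < L) (hj : j < L) :
    getCell (applyWrites ws g) i j
      = (List.lookup ((i : Int), (j : Int)) ws).getD (getCell g i j) := by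
  induction ws generalizing g with
  | nil => simp [applyWrites]
  | cons w t ih =>
    obtain ⟨hw1, hw2, hw3, hw4⟩ := hw w List.mem_cons_self
    have hrec := ih (uniform_setCell hg w.1.1 w.1.2 w.2)
      (fun x hx => hw x (List.mem_cons_of_mem _ hx)) hn.of_cons
    rw [applyWrites] at *
    simp only [List.foldl_cons]
    rw [hrec]
    rw [getCell_setCell hg hw1 hw2 hw3 hw4 hi hj]
    by_cases hkey : w.1 = ((i : Int), (j : Int))
    · have hnone : List.lookup ((i : Int), (j : Int)) t = none := by
        rw [lookupP_eq_none_iff]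
        simp only [List.map_cons, List.nodup_cons] at hn
        rw [← hkey]; exact hn.1
      rw [hnone]
      simp [List.lookup, hkey]
    · rw [if_neg (by intro ⟨x, y⟩; exact hkey (Prod.ext x y))]
      rw [List.lookup, beq_false_of_ne (by exact fun h => hkey h.symm)]

lemma foldl_two_writes {α : Type} (l : List α) (k₁ k₂ : α → ((Int × Int) × String))
    (g : List (List String)) :
    l.foldl (fun g x => setCell (setCell g (k₁ x).1.1 (k₁ x).1.2 (k₁ x).2)
      (k₂ x).1.1 (k₂ x).1.2 (k₂ x).2) g
      = applyWrites (l.flatMap (fun x => [k₁ x, k₂ x])) g := by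
  induction l generalizing g with
  | nil => simp [applyWrites]
  | cons x t ih => simp only [List.foldl_cons, List.flatMap_cons, ih, applyWrites,
      List.foldl_append, List.foldl_cons, List.foldl_nil]

lemma lookup_diag_list (l : List Int) (i j : Nat) :
    List.lookup ((i : Int), (j : Int)) (l.map (fun a => ((a, a), "X")))
      = if i = j ∧ (i : Int) ∈ l then some "X" else none := by
  induction l with
  | nil => simp
  | cons a t ih =>
    by_cases h : (i : Int) = a ∧ (j : Int) = a
    · have hij : i = j := by omega
      have hb : ((((i : Int), (j : Int))) == (a, a)) = true := by simp [h.1, h.2]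
      simp only [List.map_cons, List.lookup, hb]
      rw [if_pos ⟨hij, by rw [h.1]; exact List.mem_cons_self⟩]
    · have hb : ((((i : Int), (j : Int))) == (a, a)) = false := by
        simp only [beq_eq_false_iff_ne, ne_eq, Prod.mk.injEq]
        exact fun hh => h hh
      simp only [List.map_cons, List.lookup, hb, ih]
      by_cases hij : i = j
      · subst hij
        have : ((i : Int) ∈ a :: t) ↔ ((i : Int) ∈ t) := by
          constructor
          · intro hm; rcases List.mem_cons.1 hm with hm | hm
            · exact absurd ⟨hm, hm⟩ h
            · exact hm
          · exact fun hm => List.mem_cons_of_mem _ hm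
        simp [this]
      · simp [hij]

-- lookup in the interleaved (+,-) edge writes
lemma lookup_edges (E : List (Int × Int)) (c : Int × Int)
    (h3 : ∀ e ∈ E, ∀ e' ∈ E, e ≠ (e'.2, e'.1)) :
    List.lookup c (E.flatMap (fun e => [(e, "+"), ((e.2, e.1), "-")]))
      = if c ∈ E then some "+" else if (c.2, c.1) ∈ E then some "-" else none := by
  induction E with
  | nil => simp
  | cons e t ih =>
    have h3t : ∀ a ∈ t, ∀ a' ∈ t, a ≠ (a'.2, a'.1) := fun a ha a' ha' =>
      h3 a (List.mem_cons_of_mem _ ha) a' (List.mem_cons_of_mem _ ha')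
    simp only [List.flatMap_cons, List.cons_append, List.nil_append, List.lookup]
    by_cases hc : c = e
    · subst hc
      simp [List.mem_cons]
    · rw [beq_false_of_ne hc]
      by_cases hc2 : c = (e.2, e.1)
      · have hb : (c == (e.2, e.1)) = true := by simp [hc2]
        have hcnot : c ∉ e :: t := fun hm => h3 c hm e List.mem_cons_self hc2
        simp only [hb]
        rw [if_neg hcnot, if_pos (by rw [hc2]; simp)]
      · rw [beq_false_of_ne hc2, ih h3t]
        have hswap : (c.2, c.1) ≠ e := by
          intro h; exact hc2 (by rw [← h])
        simp [List.mem_cons, hc, hc2, hswap]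

-- tw facts
lemma filterMap_if_eq (l : List (Int × Char)) :
    l.filterMap (fun ip => if ip.2 = '2' then some ip.1 else none)
      = (l.filter (fun ip => decide (ip.2 = '2'))).map Prod.fst := by
  induction l with
  | nil => rfl
  | cons x t ih => by_cases h : x.2 = '2' <;> simp [List.filter_cons, h, ih]

lemma tw_pairwise (cs : List Char) :
    ((PySem.List.enumerate cs).filterMap
      (fun ip => if ip.2 = '2' then some ip.1 else none)).Pairwise (· < ·) := by
  rw [filterMap_if_eq]
  exact List.Pairwise.map _ (fun _ _ h => h)
    ((PySem.List.pairwise_lt_enumerate cs 0).filter _)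

lemma tw_mem_bounds (cs : List Char) (x : Int)
    (hx : x ∈ (PySem.List.enumerate cs).filterMap
      (fun ip => if ip.2 = '2' then some ip.1 else none)) :
    0 ≤ x ∧ x < (cs.length : Int) := by
  rw [filterMap_if_eq] at hx
  obtain ⟨p, hp, rfl⟩ := List.mem_map.1 hx
  have hp' := List.mem_of_mem_filter hp
  obtain ⟨k, hk, rfl⟩ := (PySem.List.mem_enumerate_iff cs 0 p).1 hp'
  constructor <;> simp <;> omega

lemma tw_length (cs : List Char) :
    ((PySem.List.enumerate cs).filterMap
      (fun ip => if ip.2 = '2' then some ip.1 else none)).length = cs.count '2' := by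
  rw [filterMap_if_eq, List.length_map, ← List.countP_eq_length_filter]
  rw [show (fun (ip : Int × Char) => decide (ip.2 = '2')) = ((fun c => c == '2') ∘ Prod.snd) by
    funext ip; rfl]
  rw [← List.countP_map, PySem.List.map_snd_enumerate, List.count]

-- canonical edge list
lemma map_getD_range (tw : List Int) :
    (List.range tw.length).map (fun k => tw.getD k 0) = tw := by
  apply List.ext_getElem (by simp)
  intro k h1 h2
  simp [List.getD_eq_getElem?_getD, List.getElem?_eq_getElem h2]

lemma q_eq_A (tw : List Int) (k : Nat) (hk : k < tw.length) :
    PySem.List.pyGetD tw (if (k : Int) + 1 = (tw.length : Int) then 0 else (k : Int) + 1) 0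
      = tw.getD ((k + 1) % tw.length) 0 := by
  by_cases h : k + 1 = tw.length
  · rw [if_pos (by omega), show (0 : Int) = ((0 : Nat) : Int) by rfl,
      PySem.List.pyGetD_natCast, h, Nat.mod_self]
  · rw [if_neg (by intro hc; exact h (by exact_mod_cast hc)),
      show (k : Int) + 1 = ((k + 1 : Nat) : Int) by push_cast; ring,
      PySem.List.pyGetD_natCast, Nat.mod_eq_of_lt (by omega)]

lemma q_eq_B (tw : List Int) (k : Nat) (hk : k < tw.length) :
    PySem.List.pyGetD tw (PySem.Int.mod ((k : Int) + 1) (tw.length : Int)) 0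
      = tw.getD ((k + 1) % tw.length) 0 := by
  rw [show (k : Int) + 1 = ((k + 1 : Nat) : Int) by push_cast; ring,
    PySem.Int.mod_natCast, PySem.List.pyGetD_natCast]

def edgeForm (tw : List Int) : List (Int × Int) :=
  (List.range tw.length).map (fun k => (tw.getD k 0, tw.getD ((k + 1) % tw.length) 0))

lemma edges_A (tw : List Int) :
    (PySem.List.enumerate tw).map
      (fun kp => (kp.2, PySem.List.pyGetD tw
        (if kp.1 + 1 = (tw.length : Int) then 0 else kp.1 + 1) 0))
      = edgeForm tw := by
  rw [PySem.List.enumerate_eq_map_pyRange tw 0, PySem.List.len_eq, PySem.List.pyRange_zero_natCast,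
    List.map_map, List.map_map]
  apply List.map_congr_left
  intro k hk
  rw [List.mem_range] at hk
  simp only [Function.comp]
  rw [PySem.List.pyGetD_natCast, q_eq_A tw k hk, List.getD_eq_getElem tw 0 hk]

lemma edges_B (tw : List Int) :
    (PySem.List.enumerate tw).map
      (fun kp => (kp.2, PySem.List.pyGetD tw (PySem.Int.mod (kp.1 + 1) (tw.length : Int)) 0))
      = edgeForm tw := by
  rw [PySem.List.enumerate_eq_map_pyRange tw 0, PySem.List.len_eq, PySem.List.pyRange_zero_natCast,
    List.map_map, List.map_map]
  apply List.map_congr_left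
  intro k hk
  rw [List.mem_range] at hk
  simp only [Function.comp]
  rw [PySem.List.pyGetD_natCast, q_eq_B tw k hk, List.getD_eq_getElem tw 0 hk]

lemma edges_B_swap (tw : List Int) :
    (PySem.List.enumerate tw).map
      (fun kp => (PySem.List.pyGetD tw (PySem.Int.mod (kp.1 + 1) (tw.length : Int)) 0, kp.2))
      = (edgeForm tw).map Prod.swap := by
  rw [← edges_B, List.map_map]
  rfl

lemma edgeForm_map_fst (tw : List Int) : (edgeForm tw).map Prod.fst = tw := by
  rw [edgeForm, List.map_map]
  exact map_getD_range tw

lemma edgeForm_no_swap (tw : List Int) (hnd : tw.Nodup) (hm : tw.length = 0 ∨ 3 ≤ tw.length) :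
    ∀ e ∈ edgeForm tw, ∀ e' ∈ edgeForm tw, e ≠ (e'.2, e'.1) := by
  intro e he e' he' heq
  obtain ⟨a, ha, rfl⟩ := List.mem_map.1 he
  obtain ⟨b, hb, rfl⟩ := List.mem_map.1 he'
  rw [List.mem_range] at ha hb
  have hm3 : 3 ≤ tw.length := by rcases hm with h | h <;> omega
  have ha1 : (a + 1) % tw.length < tw.length := Nat.mod_lt _ (by omega)
  have hb1 : (b + 1) % tw.length < tw.length := Nat.mod_lt _ (by omega)
  rw [Prod.mk.injEq] at heq
  rw [List.getD_eq_getElem tw 0 ha, List.getD_eq_getElem tw 0 hb,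
    List.getD_eq_getElem tw 0 ha1, List.getD_eq_getElem tw 0 hb1] at heq
  have e1 : a = (b + 1) % tw.length := (List.Nodup.getElem_inj_iff hnd).1 heq.1
  have e2 : (a + 1) % tw.length = b := (List.Nodup.getElem_inj_iff hnd).1 heq.2
  by_cases h1 : a + 1 = tw.length
  · rw [h1, Nat.mod_self] at e2
    subst e2
    rw [Nat.mod_eq_of_lt (by omega)] at e1
    omega
  · rw [Nat.mod_eq_of_lt (by omega)] at e2
    subst e2
    by_cases h2 : a + 1 + 1 = tw.length
    · rw [h2, Nat.mod_self] at e1; omega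
    · rw [Nat.mod_eq_of_lt (by omega)] at e1; omega

lemma edgeForm_bounds (tw : List Int) (L : Nat)
    (hb : ∀ x ∈ tw, 0 ≤ x ∧ x < (L : Int)) :
    ∀ e ∈ edgeForm tw, (0 ≤ e.1 ∧ e.1 < (L : Int)) ∧ (0 ≤ e.2 ∧ e.2 < (L : Int)) := by
  intro e he
  obtain ⟨a, ha, rfl⟩ := List.mem_map.1 he
  rw [List.mem_range] at ha
  have ha1 : (a + 1) % tw.length < tw.length := Nat.mod_lt _ (by omega)
  exact ⟨hb _ (by rw [List.getD_eq_getElem tw 0 ha]; exact List.getElem_mem ha),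
    hb _ (by rw [List.getD_eq_getElem tw 0 ha1]; exact List.getElem_mem ha1)⟩

lemma edgeForm_map_snd_nodup (tw : List Int) (hnd : tw.Nodup) :
    ((edgeForm tw).map Prod.snd).Nodup := by
  rw [edgeForm, List.map_map]
  apply List.Nodup.map_on ?_ List.nodup_range
  intro a ha b hb hab
  rw [List.mem_range] at ha hb
  have hpos : 0 < tw.length := by omega
  have hab' : tw.getD ((a + 1) % tw.length) 0 = tw.getD ((b + 1) % tw.length) 0 := hab
  have ha1 : (a + 1) % tw.length < tw.length := Nat.mod_lt _ hpos
  have hb1 : (b + 1) % tw.length < tw.length := Nat.mod_lt _ hpos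
  rw [List.getD_eq_getElem tw 0 ha1, List.getD_eq_getElem tw 0 hb1] at hab'
  have e1 : (a + 1) % tw.length = (b + 1) % tw.length := (List.Nodup.getElem_inj_iff hnd).1 hab'
  by_cases h1 : a + 1 = tw.length <;> by_cases h2 : b + 1 = tw.length
  · omega
  · rw [h1, Nat.mod_self, Nat.mod_eq_of_lt (by omega)] at e1; omega
  · rw [h2, Nat.mod_self, Nat.mod_eq_of_lt (by omega)] at e1; omega
  · rw [Nat.mod_eq_of_lt (by omega), Nat.mod_eq_of_lt (by omega)] at e1; omega

lemma nodup_edge_keys (E : List (Int × Int)) (hE : (E.map Prod.fst).Nodup)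
    (h3 : ∀ e ∈ E, ∀ e' ∈ E, e ≠ (e'.2, e'.1)) :
    ((E.flatMap (fun e => [(e, "+"), ((e.2, e.1), "-")])).map Prod.fst).Nodup := by
  induction E with
  | nil => simp
  | cons e t ih =>
    simp only [List.flatMap_cons, List.map_cons, List.map_append, List.cons_append,
      List.nil_append, List.map_cons, List.nodup_cons]
    simp only [List.map_cons, List.nodup_cons] at hE
    have h3t : ∀ a ∈ t, ∀ a' ∈ t, a ≠ (a'.2, a'.1) := fun a ha a' ha' =>
      h3 a (List.mem_cons_of_mem _ ha) a' (List.mem_cons_of_mem _ ha')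
    have hkeys : ∀ c, c ∈ (t.flatMap (fun e => [(e, "+"), ((e.2, e.1), "-")])).map Prod.fst
        ↔ (∃ e' ∈ t, c = e' ∨ c = (e'.2, e'.1)) := by
      intro c
      simp only [List.mem_map, List.mem_flatMap, List.mem_cons, List.not_mem_nil, or_false]
      constructor
      · rintro ⟨w, ⟨e', he', hw | hw⟩, rfl⟩
        · exact ⟨e', he', Or.inl (by rw [hw])⟩
        · exact ⟨e', he', Or.inr (by rw [hw])⟩
      · rintro ⟨e', he', h | h⟩
        · exact ⟨(e', "+"), ⟨e', he', by simp⟩, h.symm⟩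
        · exact ⟨((e'.2, e'.1), "-"), ⟨e', he', by simp⟩, h.symm⟩
    refine ⟨?_, ?_, ih hE.2 h3t⟩
    · intro hmem
      rcases List.mem_cons.1 hmem with h | h
      · exact h3 e List.mem_cons_self e List.mem_cons_self (by rw [← h])
      · rcases (hkeys e).1 h with ⟨e', he', h | h⟩
        · exact hE.1 (by rw [h]; exact List.mem_map.2 ⟨e', he', rfl⟩)
        · exact h3 e List.mem_cons_self e' (List.mem_cons_of_mem _ he') h
    · intro hmem
      rcases (hkeys (e.2, e.1)).1 hmem with ⟨e', he', h | h⟩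
      · exact h3 e' (List.mem_cons_of_mem _ he') e List.mem_cons_self (by rw [← h])
      · have : e = e' := by
          have := congrArg (fun p : Int × Int => (p.2, p.1)) h
          simpa using this
        exact hE.1 (by rw [this]; exact List.mem_map.2 ⟨e', he', rfl⟩)

-- canonical forms of the two ports in the YES branch
def twL (cs : List Char) : List Int :=
  (PySem.List.enumerate cs).filterMap (fun ip => if ip.2 = '2' then some ip.1 else none)

def pmWrites (e : Int × Int) : List ((Int × Int) × String) := [(e, "+"), ((e.2, e.1), "-")]

def cellF (n : Int) (E : List (Int × Int)) (i j : Nat) : String :=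
  if (i : Int) = (j : Int) ∧ (i : Int) < n then "X"
  else if ((i : Int), (j : Int)) ∈ E then "+"
  else if ((j : Int), (i : Int)) ∈ E then "-"
  else "="

def canonGrid (n : Int) (L : Nat) (E : List (Int × Int)) : List (List String) :=
  (List.range L).map (fun i => (List.range L).map (fun j => cellF n E i j))

lemma solve_A_yes (n : Int) (s : String)
    (h : ¬ (PySem.Str.count s "2" = 1 ∨ PySem.Str.count s "2" = 2)) :
    solve n s = ("YES", applyWrites ((edgeForm (twL s.toList)).flatMap pmWrites)
      (applyWrites ((PySem.List.pyRange 0 n).map (fun a => ((a, a), "X")))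
        (List.replicate s.toList.length (List.replicate s.toList.length "=")))) := by
  unfold solve
  simp only [if_neg h]
  have hp2 : (PySem.List.enumerate s.toList).foldl
      (fun acc ip => if ip.2 = '2' then acc ++ [ip.1] else acc) [] = twL s.toList := by
    rw [PySem.List.foldl_append_ite (fun ip : Int × Char => ip.2 = '2') (fun ip => ip.1)]
    rw [twL, filterMap_if_eq, List.nil_append]
  rw [hp2]
  have hg1 : ∀ g0 : List (List String),
      (PySem.List.pyRange 0 n).foldl (fun g i => setCell g i i "X") g0
        = applyWrites ((PySem.List.pyRange 0 n).map (fun a => ((a, a), "X"))) g0 := by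
    intro g0
    rw [applyWrites, List.foldl_map]
  rw [hg1]
  have hg2 : ∀ g1 : List (List String),
      (PySem.List.enumerate (twL s.toList)).foldl
        (fun g kp =>
          setCell (setCell g kp.2
              (PySem.List.pyGetD (twL s.toList)
                (if kp.1 + 1 = ((twL s.toList).length : Int) then 0 else kp.1 + 1) 0) "+")
            (PySem.List.pyGetD (twL s.toList)
                (if kp.1 + 1 = ((twL s.toList).length : Int) then 0 else kp.1 + 1) 0) kp.2 "-") g1
        = applyWrites ((edgeForm (twL s.toList)).flatMap pmWrites) g1 := by
    intro g1
    rw [foldl_two_writes (PySem.List.enumerate (twL s.toList))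
      (fun kp => ((kp.2, PySem.List.pyGetD (twL s.toList)
        (if kp.1 + 1 = ((twL s.toList).length : Int) then 0 else kp.1 + 1) 0), "+"))
      (fun kp => ((PySem.List.pyGetD (twL s.toList)
        (if kp.1 + 1 = ((twL s.toList).length : Int) then 0 else kp.1 + 1) 0, kp.2), "-"))]
    rw [← edges_A (twL s.toList), List.flatMap_map]
    rfl
  rw [hg2]

lemma getCell_replicate (L i j : Nat) :
    getCell (List.replicate L (List.replicate L "=")) i j = "=" := by
  rw [getCell]
  simp only [List.getD_eq_getElem?_getD, List.getElem?_replicate]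
  split_ifs <;> simp

lemma cell_eq (n : Int) (L : Nat) (tw : List Int)
    (htw : tw.Pairwise (· < ·)) (hb : ∀ x ∈ tw, 0 ≤ x ∧ x < (L : Int))
    (hm : tw.length = 0 ∨ 3 ≤ tw.length) (hn : n ≤ (L : Int))
    (i j : Nat) (hi : i < L) (hj : j < L) :
    getCell (applyWrites ((edgeForm tw).flatMap pmWrites)
      (applyWrites ((PySem.List.pyRange 0 n).map (fun a => ((a, a), "X")))
        (List.replicate L (List.replicate L "=")))) i j
    = cellF n (edgeForm tw) i j := by
  have hnd : tw.Nodup := htw.imp ne_of_lt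
  have h3 := edgeForm_no_swap tw hnd hm
  have hEb := edgeForm_bounds tw L hb
  have hU0 : UniformGrid L (List.replicate L (List.replicate L "=")) := by
    constructor
    · simp
    · intro r hr; rw [List.eq_of_mem_replicate hr]; simp
  have hU1 : UniformGrid L (applyWrites ((PySem.List.pyRange 0 n).map (fun a => ((a, a), "X")))
      (List.replicate L (List.replicate L "="))) := uniform_applyWrites _ hU0
  have hdb : ∀ w ∈ (PySem.List.pyRange 0 n).map (fun a => ((a, a), "X")),
      0 ≤ w.1.1 ∧ w.1.1 < (L : Int) ∧ 0 ≤ w.1.2 ∧ w.1.2 < (L : Int) := by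
    intro w hw
    obtain ⟨a, ha, rfl⟩ := List.mem_map.1 hw
    rw [PySem.List.mem_pyRange_one] at ha
    exact ⟨ha.1, by show a < (L : Int); omega, ha.1, by show a < (L : Int); omega⟩
  have hdn : (((PySem.List.pyRange 0 n).map (fun a => ((a, a), "X"))).map Prod.fst).Nodup := by
    rw [List.map_map]
    exact (PySem.List.nodup_pyRange_one 0 n).map
      (fun hxy => by simpa using congrArg (fun p : (Int × Int) × String => p.1.1) hxy)
  have hcb : ∀ w ∈ (edgeForm tw).flatMap pmWrites,
      0 ≤ w.1.1 ∧ w.1.1 < (L : Int) ∧ 0 ≤ w.1.2 ∧ w.1.2 < (L : Int) := by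
    intro w hw
    obtain ⟨e, he, hw2⟩ := List.mem_flatMap.1 hw
    obtain ⟨⟨e1a, e1b⟩, e2a, e2b⟩ := hEb e he
    simp only [pmWrites, List.mem_cons, List.not_mem_nil, or_false] at hw2
    rcases hw2 with h | h
    · rw [h]; exact ⟨e1a, e1b, e2a, e2b⟩
    · rw [h]; exact ⟨e2a, e2b, e1a, e1b⟩
  have hcnod : (((edgeForm tw).flatMap pmWrites).map Prod.fst).Nodup := by
    have := nodup_edge_keys (edgeForm tw) (by rw [edgeForm_map_fst]; exact hnd) h3
    simpa [pmWrites] using this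
  rw [getCell_applyWrites _ hU1 hcb hcnod hi hj,
    getCell_applyWrites _ hU0 hdb hdn hi hj,
    getCell_replicate, lookup_diag_list]
  have hle : List.lookup ((i : Int), (j : Int)) ((edgeForm tw).flatMap pmWrites)
      = if ((i : Int), (j : Int)) ∈ edgeForm tw then some "+"
        else if ((j : Int), (i : Int)) ∈ edgeForm tw then some "-" else none := by
    have := lookup_edges (edgeForm tw) ((i : Int), (j : Int)) h3
    simpa [pmWrites] using this
  rw [hle]
  unfold cellF
  simp only [PySem.List.mem_pyRange_one]
  by_cases hX : (i : Int) = (j : Int) ∧ (i : Int) < n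
  · have hij : i = j := by omega
    have hnotE : ((i : Int), (j : Int)) ∉ edgeForm tw := by
      intro hmem
      exact h3 _ hmem _ hmem (by rw [Prod.mk.injEq]; exact ⟨hX.1, hX.1.symm⟩)
    have hnotE' : ((j : Int), (i : Int)) ∉ edgeForm tw := by
      intro hmem
      exact h3 _ hmem _ hmem (by rw [Prod.mk.injEq]; exact ⟨hX.1.symm, hX.1⟩)
    rw [if_neg hnotE, if_neg hnotE', Option.getD_none,
      if_pos ⟨hij, by omega, hX.2⟩, if_pos hX]
    rfl
  · have hdiagF : ¬ (i = j ∧ 0 ≤ (i : Int) ∧ (i : Int) < n) := by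
      intro ⟨h1, _, h2⟩; exact hX ⟨by omega, h2⟩
    rw [if_neg hdiagF, if_neg hX, Option.getD_none]
    by_cases h1m : ((i : Int), (j : Int)) ∈ edgeForm tw
    · rw [if_pos h1m, if_pos h1m, Option.getD_some]
    · rw [if_neg h1m, if_neg h1m]
      by_cases h2m : ((j : Int), (i : Int)) ∈ edgeForm tw
      · rw [if_pos h2m, if_pos h2m, Option.getD_some]
      · rw [if_neg h2m, if_neg h2m, Option.getD_none]

lemma grids_eq (n : Int) (L : Nat) (tw : List Int)
    (htw : tw.Pairwise (· < ·)) (hb : ∀ x ∈ tw, 0 ≤ x ∧ x < (L : Int))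
    (hm : tw.length = 0 ∨ 3 ≤ tw.length) (hn : n ≤ (L : Int)) :
    applyWrites ((edgeForm tw).flatMap pmWrites)
      (applyWrites ((PySem.List.pyRange 0 n).map (fun a => ((a, a), "X")))
        (List.replicate L (List.replicate L "=")))
    = canonGrid n L (edgeForm tw) := by
  have hU0 : UniformGrid L (List.replicate L (List.replicate L "=")) := by
    constructor
    · simp
    · intro r hr; rw [List.eq_of_mem_replicate hr]; simp
  have hU2 : UniformGrid L (applyWrites ((edgeForm tw).flatMap pmWrites)
      (applyWrites ((PySem.List.pyRange 0 n).map (fun a => ((a, a), "X")))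
        (List.replicate L (List.replicate L "=")))) :=
    uniform_applyWrites _ (uniform_applyWrites _ hU0)
  apply List.ext_getElem
  · rw [hU2.1]; simp [canonGrid]
  intro i h1 h2
  simp only [canonGrid, List.length_map, List.length_range] at h2
  have hrowlen : (applyWrites ((edgeForm tw).flatMap pmWrites)
      (applyWrites ((PySem.List.pyRange 0 n).map (fun a => ((a, a), "X")))
        (List.replicate L (List.replicate L "="))))[i].length = L :=
    hU2.2 _ (List.getElem_mem h1)
  apply List.ext_getElem
  · rw [hrowlen]; simp [canonGrid]
  intro j h3' h4'
  rw [hrowlen] at h3'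
  have hcell := cell_eq n L tw htw hb hm hn i j (by rw [← hU2.1]; exact h1) h3'
  rw [getCell, List.getD_eq_getElem _ _ h1, List.getD_eq_getElem _ _ (by rw [hrowlen]; exact h3')]
    at hcell
  rw [hcell]
  simp only [canonGrid, List.getElem_map, List.getElem_range]

-- ===== B-side lemmas =====

lemma lookup_of_mem_nodup {β : Type} [DecidableEq β] {l : List (Int × β)} {k : Int} {v : β}
    (hnd : (l.map Prod.fst).Nodup) (hm : (k, v) ∈ l) : List.lookup k l = some v := by
  induction l with
  | nil => simp at hm
  | cons p t ih =>
    simp only [List.map_cons, List.nodup_cons] at hnd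
    rcases List.mem_cons.1 hm with h | h
    · rw [← h]; simp [List.lookup]
    · have hk : k ≠ p.1 := by
        intro hk
        exact hnd.1 (List.mem_map.2 ⟨(k, v), h, by rw [hk]⟩)
      rw [List.lookup, beq_false_of_ne hk]
      exact ih hnd.2 h

lemma lookup_none_of_not_key {β : Type} {l : List (Int × β)} {k : Int}
    (h : ∀ p ∈ l, k ≠ p.1) : List.lookup k l = none := by
  rw [List.lookup_eq_none_iff]
  intro p hp
  exact bne_iff_ne.2 (h p hp)

-- the gap-filling row builder produces exactly the lookup table over [prev, L)
lemma build_row (L : Nat) : ∀ (marks : List (Int × String)) (acc : List String) (prev : Int),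
    marks.Pairwise (fun a b => a.1 < b.1) →
    (∀ p ∈ marks, prev ≤ p.1 ∧ p.1 < (L : Int)) →
    0 ≤ prev → prev ≤ (L : Int) →
    (marks.foldl (fun (st : List String × Int) c =>
        (st.1 ++ List.replicate (c.1 - st.2).toNat "=" ++ [c.2], c.1 + 1)) (acc, prev)).1
      ++ List.replicate ((L : Int) - (marks.foldl (fun (st : List String × Int) c =>
        (st.1 ++ List.replicate (c.1 - st.2).toNat "=" ++ [c.2], c.1 + 1)) (acc, prev)).2).toNat "="
    = acc ++ (PySem.List.pyRange prev (L : Int)).map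
        (fun j => (List.lookup j marks).getD "=") := by
  intro marks
  induction marks with
  | nil =>
    intro acc prev _ _ h0 hL
    simp only [List.foldl_nil]
    have h1 : ∀ x ∈ (PySem.List.pyRange prev (L : Int)).map
        (fun j => (List.lookup j ([] : List (Int × String))).getD "="), x = "=" := by
      intro x hx
      obtain ⟨j, _, rfl⟩ := List.mem_map.1 hx
      rfl
    rw [List.eq_replicate_of_mem h1, List.length_map, PySem.List.length_pyRange_one]
  | cons c t ih =>
    intro acc prev hpw hbd h0 hL
    obtain ⟨q, v⟩ := c
    obtain ⟨hc1, hc2⟩ := hbd (q, v) List.mem_cons_self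
    simp only at hc1 hc2
    have hpwc := List.pairwise_cons.1 hpw
    have hndk : (((q, v) :: t).map Prod.fst).Nodup :=
      (List.pairwise_map).2 (hpw.imp (fun h => ne_of_lt h))
    simp only [List.foldl_cons]
    rw [ih (acc ++ List.replicate (q - prev).toNat "=" ++ [v]) (q + 1) hpwc.2
      (fun p hp => ⟨by have := hpwc.1 p hp; simp only at this; omega,
        (hbd p (List.mem_cons_of_mem _ hp)).2⟩)
      (by omega) (by omega)]
    rw [PySem.List.pyRange_one_append prev q (L : Int) hc1 (by omega),
      PySem.List.pyRange_one_cons hc2]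
    rw [List.map_append, List.map_cons]
    have hmid : (List.lookup q ((q, v) :: t)).getD "=" = v := by
      rw [lookup_of_mem_nodup hndk List.mem_cons_self]
      rfl
    have hpre : (PySem.List.pyRange prev q).map
          (fun j => (List.lookup j ((q, v) :: t)).getD "=")
        = List.replicate (q - prev).toNat "=" := by
      have h1 : ∀ x ∈ (PySem.List.pyRange prev q).map
          (fun j => (List.lookup j ((q, v) :: t)).getD "="), x = "=" := by
        intro x hx
        obtain ⟨j, hj, rfl⟩ := List.mem_map.1 hx
        rw [PySem.List.mem_pyRange_one] at hj
        have hnone : List.lookup j ((q, v) :: t) = none := by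
          apply lookup_none_of_not_key
          intro p hp
          rcases List.mem_cons.1 hp with h | h
          · rw [h]; simp only; omega
          · have := hpwc.1 p h; simp only at this; omega
        rw [hnone]
        rfl
      rw [List.eq_replicate_of_mem h1, List.length_map, PySem.List.length_pyRange_one]
    have htail : (PySem.List.pyRange (q + 1) (L : Int)).map
          (fun j => (List.lookup j ((q, v) :: t)).getD "=")
        = (PySem.List.pyRange (q + 1) (L : Int)).map
          (fun j => (List.lookup j t).getD "=") := by
      apply List.map_congr_left
      intro j hj
      rw [PySem.List.mem_pyRange_one] at hj
      rw [List.lookup, beq_false_of_ne (by simp only; omega : j ≠ (q, v).1)]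
    rw [hpre, hmid, htail]
    simp [List.append_assoc]

lemma pairwise_keys_lt_of_sorted (l : List (Int × String))
    (hnd : (l.map Prod.fst).Nodup) :
    (PySem.List.sorted l (fun t => t.1) false).Pairwise (fun a b => a.1 < b.1) := by
  have hperm : ((PySem.List.sorted l (fun t => t.1) false).map Prod.fst).Perm (l.map Prod.fst) :=
    (PySem.List.sorted_perm l (fun t => t.1) false).map Prod.fst
  have hnd' : ((PySem.List.sorted l (fun t => t.1) false).map Prod.fst).Nodup :=
    hperm.nodup_iff.2 hnd
  have hne : (PySem.List.sorted l (fun t => t.1) false).Pairwise (fun a b => a.1 ≠ b.1) :=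
    (List.pairwise_map).1 hnd'
  have hle := PySem.List.sorted_pairwise l (fun t => t.1)
  exact (hle.and hne).imp (fun h => lt_of_le_of_ne h.1 h.2)

-- a row whose sorted mark list matches the canonical cells, built by gap filling
lemma row_from_marks (n : Int) (L : Nat) (E : List (Int × Int)) (i : Nat)
    (marks3 : List (Int × String))
    (hmemX : ∀ j : Int, ((j, "X") ∈ marks3 ↔ j = (i : Int) ∧ (i : Int) < n))
    (hmemP : ∀ j : Int, ((j, "+") ∈ marks3 ↔ ((i : Int), j) ∈ E))
    (hmemM : ∀ j : Int, ((j, "-") ∈ marks3 ↔ (j, (i : Int)) ∈ E))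
    (hsym : ∀ p ∈ marks3, p.2 = "X" ∨ p.2 = "+" ∨ p.2 = "-")
    (hkeys : (marks3.map Prod.fst).Nodup)
    (hbd : ∀ p ∈ marks3, 0 ≤ p.1 ∧ p.1 < (L : Int)) :
    ((PySem.List.sorted marks3 (fun t => t.1) false).foldl
        (fun (st : List String × Int) c =>
          (st.1 ++ List.replicate (c.1 - st.2).toNat "=" ++ [c.2], c.1 + 1)) ([], 0)).1
      ++ List.replicate ((L : Int) - ((PySem.List.sorted marks3 (fun t => t.1) false).foldl
        (fun (st : List String × Int) c =>
          (st.1 ++ List.replicate (c.1 - st.2).toNat "=" ++ [c.2], c.1 + 1)) ([], 0)).2).toNat "="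
    = (List.range L).map (fun j => cellF n E i j) := by
  have hms := fun (x : Int × String) => PySem.List.mem_sorted marks3 (fun t => t.1) false x
  have hkeys' : ((PySem.List.sorted marks3 (fun t => t.1) false).map Prod.fst).Nodup :=
    (((PySem.List.sorted_perm marks3 (fun t => t.1) false).map Prod.fst).nodup_iff).2 hkeys
  rw [build_row L (PySem.List.sorted marks3 (fun t => t.1) false) [] 0
    (pairwise_keys_lt_of_sorted marks3 hkeys)
    (fun p hp => hbd p ((hms p).1 hp)) le_rfl (by omega)]
  rw [List.nil_append, PySem.List.pyRange_zero_natCast, List.map_map]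
  apply List.map_congr_left
  intro j hj
  rw [List.mem_range] at hj
  simp only [Function.comp]
  unfold cellF
  by_cases hX : (i : Int) = (j : Int) ∧ (i : Int) < n
  · rw [lookup_of_mem_nodup hkeys' ((hms _).2 ((hmemX (j : Int)).2 ⟨hX.1.symm, hX.2⟩)),
      if_pos hX]
    rfl
  · rw [if_neg hX]
    by_cases hP : ((i : Int), (j : Int)) ∈ E
    · rw [lookup_of_mem_nodup hkeys' ((hms _).2 ((hmemP (j : Int)).2 hP)), if_pos hP]
      rfl
    · rw [if_neg hP]
      by_cases hM : ((j : Int), (i : Int)) ∈ E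
      · rw [lookup_of_mem_nodup hkeys' ((hms _).2 ((hmemM (j : Int)).2 hM)), if_pos hM]
        rfl
      · rw [if_neg hM]
        rw [lookup_none_of_not_key (fun p hp => ?_)]
        · rfl
        · have hp3 := (hms p).1 hp
          intro hjp
          rcases hsym p hp3 with hs | hs | hs
          · have : (p.1, "X") ∈ marks3 := by rw [← hs]; exact hp3
            have := (hmemX p.1).1 this
            exact hX ⟨by omega, this.2⟩
          · have : (p.1, "+") ∈ marks3 := by rw [← hs]; exact hp3
            have := (hmemP p.1).1 this
            rw [← hjp] at this
            exact hP this
          · have : (p.1, "-") ∈ marks3 := by rw [← hs]; exact hp3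
            have := (hmemM p.1).1 this
            rw [← hjp] at this
            exact hM this

-- membership in a one-element conditional list
lemma mem_ite_singleton {α : Type} {x a : α} {c : Prop} [Decidable c]
    (h : x ∈ (if c then [a] else [])) : c ∧ x = a := by
  split_ifs at h with hc
  · exact ⟨hc, List.mem_singleton.1 h⟩
  · simp at h

-- the whole YES grid of B, with the two dicts abstracted by their item lists
lemma alt_core (n : Int) (L : Nat) (tw : List Int) (sd pd : PySem.Dict Int Int)
    (hsi : sd.items = edgeForm tw) (hpi : pd.items = (edgeForm tw).map Prod.swap)
    (htw : tw.Pairwise (· < ·)) (hb : ∀ x ∈ tw, 0 ≤ x ∧ x < (L : Int))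
    (hm : tw.length = 0 ∨ 3 ≤ tw.length) :
    (PySem.List.pyRange 0 (L : Int)).foldl
      (fun g i => g ++ [rowB n (L : Int) sd pd i]) []
    = canonGrid n L (edgeForm tw) := by
  have hnd : tw.Nodup := htw.imp ne_of_lt
  have h3 := edgeForm_no_swap tw hnd hm
  have hEb := edgeForm_bounds tw L hb
  have hks : sd.keys = tw := by
    show sd.items.map Prod.fst = tw
    rw [hsi, edgeForm_map_fst]
  have hndk_s : sd.keys.Nodup := by rw [hks]; exact hnd
  have hkp : pd.keys = (edgeForm tw).map Prod.snd := by
    show pd.items.map Prod.fst = _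
    rw [hpi, List.map_map]
    rfl
  have hndk_p : pd.keys.Nodup := by rw [hkp]; exact edgeForm_map_snd_nodup tw hnd
  have hs_some : ∀ x v, sd.get? x = some v ↔ (x, v) ∈ edgeForm tw := by
    intro x v
    rw [PySem.Dict.get?_eq_some_iff_mem_items sd x v hndk_s, hsi]
  have hp_some : ∀ x v, pd.get? x = some v ↔ (v, x) ∈ edgeForm tw := by
    intro x v
    rw [PySem.Dict.get?_eq_some_iff_mem_items pd x v hndk_p, hpi]
    constructor
    · intro h
      obtain ⟨e, he, hev⟩ := List.mem_map.1 h
      have : e = (v, x) := by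
        cases e; cases hev; rfl
      rw [← this]; exact he
    · intro h
      exact List.mem_map.2 ⟨(v, x), h, rfl⟩
  have hsP : ∀ x : Int, sd.contains x = true ↔ ∃ v, (x, v) ∈ edgeForm tw := by
    intro x
    rw [PySem.Dict.contains_eq_isSome_get?, Option.isSome_iff_exists]
    exact ⟨fun ⟨v, hv⟩ => ⟨v, (hs_some x v).1 hv⟩, fun ⟨v, hv⟩ => ⟨v, (hs_some x v).2 hv⟩⟩
  have hpP : ∀ x : Int, pd.contains x = true ↔ ∃ v, (v, x) ∈ edgeForm tw := by
    intro x
    rw [PySem.Dict.contains_eq_isSome_get?, Option.isSome_iff_exists]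
    exact ⟨fun ⟨v, hv⟩ => ⟨v, (hp_some x v).1 hv⟩, fun ⟨v, hv⟩ => ⟨v, (hp_some x v).2 hv⟩⟩
  have hsD : ∀ x v, (x, v) ∈ edgeForm tw → sd.getD x 0 = v := by
    intro x v hv
    rw [PySem.Dict.getD_eq_get?_getD, (hs_some x v).2 hv]
    rfl
  have hpD : ∀ x v, (v, x) ∈ edgeForm tw → pd.getD x 0 = v := by
    intro x v hv
    rw [PySem.Dict.getD_eq_get?_getD, (hp_some x v).2 hv]
    rfl
  rw [PySem.List.foldl_append_singleton_eq_map, List.nil_append,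
    PySem.List.pyRange_zero_natCast, List.map_map]
  simp only [canonGrid]
  apply List.map_congr_left
  intro i hi
  rw [List.mem_range] at hi
  simp only [Function.comp]
  show rowB n (L : Int) sd pd (i : Int) = _
  simp only [rowB]
  have hflat : ∀ (c1 : Prop) (c2 c3 : Bool) [Decidable c1] (a b c : Int × String),
      (if c3 then (if c2 then (if c1 then ([] : List (Int × String)) ++ [a] else []) ++ [b]
          else (if c1 then ([] : List (Int × String)) ++ [a] else [])) ++ [c]
        else (if c2 then (if c1 then ([] : List (Int × String)) ++ [a] else []) ++ [b]
          else (if c1 then ([] : List (Int × String)) ++ [a] else [])))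
      = (if c1 then [a] else []) ++ (if c2 then [b] else []) ++ (if c3 then [c] else []) := by
    intro c1 c2 c3 _ a b c
    by_cases h1 : c1 <;> cases c2 <;> cases c3 <;> simp [h1]
  rw [hflat]
  set M : List (Int × String) :=
    (if (i : Int) < n then [((i : Int), "X")] else []) ++
    (if sd.contains (i : Int) then [(sd.getD (i : Int) 0, "+")] else []) ++
    (if pd.contains (i : Int) then [(pd.getD (i : Int) 0, "-")] else []) with hM
  have hmemX : ∀ j : Int, ((j, "X") ∈ M ↔ j = (i : Int) ∧ (i : Int) < n) := by
    intro j
    rw [hM]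
    simp only [List.mem_append]
    constructor
    · rintro ((h | h) | h)
      · obtain ⟨hc, he⟩ := mem_ite_singleton h
        exact ⟨congrArg Prod.fst he, hc⟩
      · obtain ⟨_, he⟩ := mem_ite_singleton h
        exact absurd he (by simp)
      · obtain ⟨_, he⟩ := mem_ite_singleton h
        exact absurd he (by simp)
    · rintro ⟨rfl, hlt⟩
      left; left
      rw [if_pos hlt]
      exact List.mem_singleton.2 rfl
  have hmemP : ∀ j : Int, ((j, "+") ∈ M ↔ ((i : Int), j) ∈ edgeForm tw) := by
    intro j
    rw [hM]
    simp only [List.mem_append]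
    constructor
    · rintro ((h | h) | h)
      · obtain ⟨_, he⟩ := mem_ite_singleton h
        exact absurd he (by simp)
      · obtain ⟨hc, he⟩ := mem_ite_singleton h
        obtain ⟨v, hv⟩ := (hsP (i : Int)).1 hc
        have hj : j = sd.getD (i : Int) 0 := congrArg Prod.fst he
        rw [hj, hsD _ v hv]
        exact hv
      · obtain ⟨_, he⟩ := mem_ite_singleton h
        exact absurd he (by simp)
    · intro hE
      left; right
      rw [if_pos ((hsP (i : Int)).2 ⟨j, hE⟩), hsD _ j hE]
      exact List.mem_singleton.2 rfl
  have hmemM : ∀ j : Int, ((j, "-") ∈ M ↔ (j, (i : Int)) ∈ edgeForm tw) := by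
    intro j
    rw [hM]
    simp only [List.mem_append]
    constructor
    · rintro ((h | h) | h)
      · obtain ⟨_, he⟩ := mem_ite_singleton h
        exact absurd he (by simp)
      · obtain ⟨_, he⟩ := mem_ite_singleton h
        exact absurd he (by simp)
      · obtain ⟨hc, he⟩ := mem_ite_singleton h
        obtain ⟨v, hv⟩ := (hpP (i : Int)).1 hc
        have hj : j = pd.getD (i : Int) 0 := congrArg Prod.fst he
        rw [hj, hpD _ v hv]
        exact hv
    · intro hE
      right
      rw [if_pos ((hpP (i : Int)).2 ⟨j, hE⟩), hpD _ j hE]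
      exact List.mem_singleton.2 rfl
  have hsym : ∀ p ∈ M, p.2 = "X" ∨ p.2 = "+" ∨ p.2 = "-" := by
    intro p hp
    rw [hM] at hp
    simp only [List.mem_append] at hp
    rcases hp with (h | h) | h
    · exact Or.inl (congrArg Prod.snd (mem_ite_singleton h).2)
    · exact Or.inr (Or.inl (congrArg Prod.snd (mem_ite_singleton h).2))
    · exact Or.inr (Or.inr (congrArg Prod.snd (mem_ite_singleton h).2))
  have hdis : sd.contains (i : Int) = true → (i : Int) ≠ sd.getD (i : Int) 0 := by
    intro hc heq
    obtain ⟨v, hv⟩ := (hsP (i : Int)).1 hc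
    rw [hsD _ v hv] at heq
    rw [← heq] at hv
    exact h3 _ hv _ hv (by simp)
  have hdip : pd.contains (i : Int) = true → (i : Int) ≠ pd.getD (i : Int) 0 := by
    intro hc heq
    obtain ⟨v, hv⟩ := (hpP (i : Int)).1 hc
    rw [hpD _ v hv] at heq
    rw [← heq] at hv
    exact h3 _ hv _ hv (by simp)
  have hdsp : sd.contains (i : Int) = true → pd.contains (i : Int) = true →
      sd.getD (i : Int) 0 ≠ pd.getD (i : Int) 0 := by
    intro hcs hcp heq
    obtain ⟨sv, hsv⟩ := (hsP (i : Int)).1 hcs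
    obtain ⟨pv, hpv⟩ := (hpP (i : Int)).1 hcp
    rw [hsD _ sv hsv, hpD _ pv hpv] at heq
    subst heq
    exact h3 _ hsv _ hpv (by simp)
  have hkeys : (M.map Prod.fst).Nodup := by
    rw [hM]
    simp only [List.map_append]
    have e1 : ((if (i : Int) < n then [((i : Int), "X")] else []).map Prod.fst)
        = (if (i : Int) < n then [(i : Int)] else []) := by split_ifs <;> rfl
    have e2 : ((if sd.contains (i : Int) then [(sd.getD (i : Int) 0, "+")] else []).map Prod.fst)
        = (if sd.contains (i : Int) then [sd.getD (i : Int) 0] else []) := by split_ifs <;> rfl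
    have e3 : ((if pd.contains (i : Int) then [(pd.getD (i : Int) 0, "-")] else []).map Prod.fst)
        = (if pd.contains (i : Int) then [pd.getD (i : Int) 0] else []) := by split_ifs <;> rfl
    rw [e1, e2, e3, List.nodup_append, List.nodup_append]
    refine ⟨⟨?_, ?_, ?_⟩, ?_, ?_⟩
    · split_ifs <;> simp
    · split_ifs <;> simp
    · intro a ha b hb2
      by_cases hc2 : sd.contains (i : Int) = true
      · rw [if_pos hc2, List.mem_singleton] at hb2
        by_cases hc1 : (i : Int) < n
        · rw [if_pos hc1, List.mem_singleton] at ha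
          intro heq
          exact hdis hc2 (ha.symm.trans (heq.trans hb2))
        · rw [if_neg hc1] at ha; simp at ha
      · rw [if_neg hc2] at hb2; simp at hb2
    · split_ifs <;> simp
    · intro a ha b hb3
      by_cases hc3 : pd.contains (i : Int) = true
      · rw [if_pos hc3, List.mem_singleton] at hb3
        rcases List.mem_append.1 ha with h | h
        · by_cases hc1 : (i : Int) < n
          · rw [if_pos hc1, List.mem_singleton] at h
            intro heq
            exact hdip hc3 (h.symm.trans (heq.trans hb3))
          · rw [if_neg hc1] at h; simp at h
        · by_cases hc2 : sd.contains (i : Int) = true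
          · rw [if_pos hc2, List.mem_singleton] at h
            intro heq
            exact hdsp hc2 hc3 (h.symm.trans (heq.trans hb3))
          · rw [if_neg hc2] at h; simp at h
      · rw [if_neg hc3] at hb3; simp at hb3
  have hbd : ∀ p ∈ M, 0 ≤ p.1 ∧ p.1 < (L : Int) := by
    intro p hp
    rcases hsym p hp with hs | hs | hs
    · have : (p.1, "X") ∈ M := by rw [← hs]; exact hp
      have hx := (hmemX p.1).1 this
      constructor <;> omega
    · have : (p.1, "+") ∈ M := by rw [← hs]; exact hp
      have hx := (hmemP p.1).1 this
      exact (hEb _ hx).2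
    · have : (p.1, "-") ∈ M := by rw [← hs]; exact hp
      have hx := (hmemM p.1).1 this
      exact (hEb _ hx).1
  exact row_from_marks n L (edgeForm tw) i M hmemX hmemP hmemM hsym hkeys hbd

lemma solve_B_yes (n : Int) (s : String)
    (h : ¬ ((twL s.toList).length = 1 ∨ (twL s.toList).length = 2)) :
    solve_alt n s
      = ("YES", canonGrid n s.toList.length (edgeForm (twL s.toList))) := by
  have htw := tw_pairwise s.toList
  have hb := tw_mem_bounds s.toList
  have hnd : (twL s.toList).Nodup := htw.imp ne_of_lt
  simp only [solve_alt]
  rw [show ((PySem.List.enumerate s.toList).filterMap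
      (fun ip => if ip.2 = '2' then some ip.1 else none)) = twL s.toList from rfl]
  rw [if_neg h]
  have hmap2 : ((PySem.List.enumerate (twL s.toList)).map (fun kp => kp.2)).Nodup := by
    rw [show (fun (kp : Int × Int) => kp.2) = (Prod.snd : Int × Int → Int) from rfl,
      PySem.List.map_snd_enumerate]
    exact hnd
  have hQmap : ((PySem.List.enumerate (twL s.toList)).map
      (fun kp => PySem.List.pyGetD (twL s.toList)
        (PySem.Int.mod (kp.1 + 1) (((twL s.toList).length : Nat) : Int)) 0)).Nodup := by
    have := congrArg (List.map Prod.snd) (edges_B (twL s.toList))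
    rw [List.map_map] at this
    rw [show (fun (kp : Int × Int) => PySem.List.pyGetD (twL s.toList)
        (PySem.Int.mod (kp.1 + 1) (((twL s.toList).length : Nat) : Int)) 0)
      = (Prod.snd ∘ fun (kp : Int × Int) => (kp.2, PySem.List.pyGetD (twL s.toList)
        (PySem.Int.mod (kp.1 + 1) ((twL s.toList).length : Int)) 0)) from rfl, this]
    exact edgeForm_map_snd_nodup _ hnd
  have hsi : ((PySem.List.enumerate (twL s.toList)).foldl
      (fun (d : PySem.Dict Int Int) kp => d.insert kp.2
        (PySem.List.pyGetD (twL s.toList)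
          (PySem.Int.mod (kp.1 + 1) (((twL s.toList).length : Nat) : Int)) 0))
      PySem.Dict.empty).items = edgeForm (twL s.toList) := by
    rw [PySem.Dict.items_foldl_insert_fresh (PySem.List.enumerate (twL s.toList))
      (fun kp => kp.2)
      (fun kp => PySem.List.pyGetD (twL s.toList)
        (PySem.Int.mod (kp.1 + 1) (((twL s.toList).length : Nat) : Int)) 0)
      PySem.Dict.empty (fun a _ => PySem.Dict.contains_empty _) hmap2]
    rw [show (PySem.Dict.empty : PySem.Dict Int Int).items = [] from rfl, List.nil_append]
    exact edges_B (twL s.toList)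
  have hpi : ((PySem.List.enumerate (twL s.toList)).foldl
      (fun (d : PySem.Dict Int Int) kp => d.insert
        (PySem.List.pyGetD (twL s.toList)
          (PySem.Int.mod (kp.1 + 1) (((twL s.toList).length : Nat) : Int)) 0) kp.2)
      PySem.Dict.empty).items = (edgeForm (twL s.toList)).map Prod.swap := by
    rw [PySem.Dict.items_foldl_insert_fresh (PySem.List.enumerate (twL s.toList))
      (fun kp => PySem.List.pyGetD (twL s.toList)
        (PySem.Int.mod (kp.1 + 1) (((twL s.toList).length : Nat) : Int)) 0)
      (fun kp => kp.2)
      PySem.Dict.empty (fun a _ => PySem.Dict.contains_empty _) hQmap]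
    rw [show (PySem.Dict.empty : PySem.Dict Int Int).items = [] from rfl, List.nil_append]
    exact edges_B_swap (twL s.toList)
  have hsp := PySem.List.foldl_prod_mk
    (fun (d : PySem.Dict Int Int) (kp : Int × Int) => d.insert kp.2
      (PySem.List.pyGetD (twL s.toList)
        (PySem.Int.mod (kp.1 + 1) (((twL s.toList).length : Nat) : Int)) 0))
    (fun (d : PySem.Dict Int Int) (kp : Int × Int) => d.insert
      (PySem.List.pyGetD (twL s.toList)
        (PySem.Int.mod (kp.1 + 1) (((twL s.toList).length : Nat) : Int)) 0) kp.2)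
    (PySem.List.enumerate (twL s.toList)) PySem.Dict.empty PySem.Dict.empty
  refine congrArg (Prod.mk "YES") ?_
  have hm : (twL s.toList).length = 0 ∨ 3 ≤ (twL s.toList).length := by omega
  exact alt_core n s.toList.length (twL s.toList) _ _
    (by rw [show (((PySem.List.enumerate (twL s.toList)).foldl
        (fun (d : PySem.Dict Int Int × PySem.Dict Int Int) kp =>
          (d.1.insert kp.2 (PySem.List.pyGetD (twL s.toList)
            (PySem.Int.mod (kp.1 + 1) (((twL s.toList).length : Nat) : Int)) 0),
           d.2.insert (PySem.List.pyGetD (twL s.toList)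
            (PySem.Int.mod (kp.1 + 1) (((twL s.toList).length : Nat) : Int)) 0) kp.2))
        (PySem.Dict.empty, PySem.Dict.empty)).1) = _ from congrArg Prod.fst hsp, hsi])
    (by rw [show (((PySem.List.enumerate (twL s.toList)).foldl
        (fun (d : PySem.Dict Int Int × PySem.Dict Int Int) kp =>
          (d.1.insert kp.2 (PySem.List.pyGetD (twL s.toList)
            (PySem.Int.mod (kp.1 + 1) (((twL s.toList).length : Nat) : Int)) 0),
           d.2.insert (PySem.List.pyGetD (twL s.toList)
            (PySem.Int.mod (kp.1 + 1) (((twL s.toList).length : Nat) : Int)) 0) kp.2))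
        (PySem.Dict.empty, PySem.Dict.empty)).2) = _ from congrArg Prod.snd hsp, hpi])
    htw hb hm

theorem solve_spec : Claim_equal_solve := by
  intro n s hdom hpre
  unfold Spec_solve
  have hcnt := str_count_two s
  have hlen' : (twL s.toList).length = s.toList.count '2' := tw_length s.toList
  by_cases hc : s.toList.count '2' = 1 ∨ s.toList.count '2' = 2
  · have hA : solve n s = ("NO", []) := by
      simp only [solve]
      rw [if_pos (show PySem.Str.count s "2" = 1 ∨ PySem.Str.count s "2" = 2 by
        rw [hcnt]; exact hc)]
    have hB : solve_alt n s = ("NO", []) := by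
      simp only [solve_alt]
      rw [show ((PySem.List.enumerate s.toList).filterMap
          (fun ip => if ip.2 = '2' then some ip.1 else none)) = twL s.toList from rfl]
      rw [if_pos (show (twL s.toList).length = 1 ∨ (twL s.toList).length = 2 by
        rw [hlen']; exact hc)]
    rw [hA, hB]
  · have hc' : ¬ ((twL s.toList).length = 1 ∨ (twL s.toList).length = 2) := by
      rw [hlen']; exact hc
    rw [solve_A_yes n s (by rw [hcnt]; exact hc), solve_B_yes n s hc']
    have h1 : s.toList.count '2' ≠ 1 := fun h => hc (Or.inl h)
    have h2 : s.toList.count '2' ≠ 2 := fun h => hc (Or.inr h)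
    have hm : (twL s.toList).length = 0 ∨ 3 ≤ (twL s.toList).length := by omega
    have hn : n ≤ (s.toList.length : Int) := by
      rcases hpre with h | h
      · exact h
      · exact absurd h hc
    exact congrArg (Prod.mk "YES")
      (grids_eq n s.toList.length (twL s.toList) (tw_pairwise s.toList)
        (tw_mem_bounds s.toList) hm hn)
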